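-- pv_equiv track=rewrite | github.com/pypi-data/pypi-mirror-386 | packages/skillforge/skillforge-1.0.2.tar.gz/skillforge-1.0.2/skillforge/analyzers/skill_optimizer.py | _compress_whitespace
-- ===== SOURCE A (Python) =====
-- def _compress_whitespace(content: str) -> str:
--     """Compress excessive whitespace"""
--     # Remove trailing whitespace
--     lines = [line.rstrip() for line in content.split('\n')]
--
--     # Remove more than 2 consecutive empty lines
--     compressed = []
--     empty_count = 0
--
--     for line in lines:
--         if line.strip() == '':
--             empty_count += 1
--             if empty_count <= 2:
--                 compressed.append(line)
--         else:
--             empty_count = 0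
--             compressed.append(line)
--
--     return '\n'.join(compressed)
-- ===== SOURCE B (Python) =====
-- from itertools import groupby
--
--
-- def _compress_whitespace(content: str) -> str:
--     """Compress excessive whitespace"""
--     lines = [line.rstrip() for line in content.split('\n')]
--     out = []
--     for is_empty, run in groupby(lines, key=lambda l: l == ''):
--         run = list(run)
--         out.extend(run[:2] if is_empty else run)
--     return '\n'.join(out)
-- ===== Notes on version B (the rewrite author's own statement) =====
-- stated objective: alternative
-- what changed: Replaces the per-line empty counter and branch with an itertools.groupby traversal of maximal runs of same-emptiness lines, keeping only the first two lines of each blank run.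
import Mathlib
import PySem

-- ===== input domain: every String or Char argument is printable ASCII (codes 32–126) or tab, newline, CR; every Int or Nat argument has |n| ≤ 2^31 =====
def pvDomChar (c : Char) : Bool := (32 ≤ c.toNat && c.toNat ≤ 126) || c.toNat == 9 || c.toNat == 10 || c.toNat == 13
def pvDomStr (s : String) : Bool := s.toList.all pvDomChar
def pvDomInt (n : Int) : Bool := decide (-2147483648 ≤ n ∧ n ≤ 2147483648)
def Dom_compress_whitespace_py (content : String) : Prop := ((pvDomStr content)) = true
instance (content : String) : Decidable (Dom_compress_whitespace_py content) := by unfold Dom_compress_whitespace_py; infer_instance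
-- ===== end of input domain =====

-- B replaces A's per-line empty counter with a run-based (groupby) traversal keeping the first two lines of each blank run; alternative structure, same cost.


-- ===== PORT A =====
-- lines = [line.rstrip() for line in content.split('\n')]; counter loop over lines; '\n'.join
def compress_whitespace_py (content : String) : String :=
  let lines := (PySem.Chars.splitOn content.toList ['\n']).map PySem.Chars.rstrip
  let res := lines.foldl
    (fun (st : Nat × List (List Char)) line =>
      if PySem.Chars.strip line = [] then
        let e := st.1 + 1
        (e, if e ≤ 2 then st.2 ++ [line] else st.2)
      else
        (0, st.2 ++ [line]))
    (0, [])
  String.ofList (PySem.Chars.join ['\n'] res.2)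

-- ===== PORT B =====
-- itertools.groupby(lines, key=lambda l: l == ''): maximal runs of same-emptiness lines
def pvRuns : List (List Char) → List (Bool × List (List Char))
  | [] => []
  | l :: ls =>
    let k := l.isEmpty
    (k, l :: ls.takeWhile (fun x => x.isEmpty == k)) ::
      pvRuns (ls.dropWhile (fun x => x.isEmpty == k))
termination_by ls => ls.length
decreasing_by
  exact Nat.lt_succ_of_le (List.length_dropWhile_le _ _)

def compress_whitespace_py_alt (content : String) : String :=
  let lines := (PySem.Chars.splitOn content.toList ['\n']).map PySem.Chars.rstrip
  let out := (pvRuns lines).flatMap (fun r => if r.1 then r.2.take 2 else r.2)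
  String.ofList (PySem.Chars.join ['\n'] out)

-- ===== PRECONDITION & SPEC =====
def Spec_compress_whitespace_py (content : String) (out : String) : Prop := out = compress_whitespace_py_alt content
instance (content : String) (out : String) : Decidable (Spec_compress_whitespace_py content out) := by unfold Spec_compress_whitespace_py; infer_instance

-- ===== CLAIM (what is proved, stated in full; the proofs are below) =====
def Claim_equal_compress_whitespace_py : Prop := ∀ (content : String), Dom_compress_whitespace_py content → Spec_compress_whitespace_py content (compress_whitespace_py content)

-- ===== LEMMAS AND PROOFS =====

-- A's loop, rephrased as a structural recursion on the remaining lines (proof helper)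
def aLoop : List (List Char) → Nat → List (List Char)
  | [], _ => []
  | l :: ls, ec =>
    if PySem.Chars.strip l = [] then
      (if ec + 1 ≤ 2 then [l] else []) ++ aLoop ls (ec + 1)
    else
      l :: aLoop ls 0

lemma foldl_eq_aLoop (ls : List (List Char)) (ec : Nat) (acc : List (List Char)) :
    (ls.foldl
      (fun (st : Nat × List (List Char)) line =>
        if PySem.Chars.strip line = [] then
          let e := st.1 + 1
          (e, if e ≤ 2 then st.2 ++ [line] else st.2)
        else
          (0, st.2 ++ [line])) (ec, acc)).2 = acc ++ aLoop ls ec := by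
  induction ls generalizing ec acc with
  | nil => simp [aLoop]
  | cons l ls ih =>
    simp only [List.foldl_cons, aLoop]
    split_ifs with h1 h2 <;> rw [ih] <;> simp

lemma forall_dropWhile_iff {α : Type} (p : α → Bool) (l : List α) :
    (∀ c ∈ l.dropWhile p, p c = true) ↔ (∀ c ∈ l, p c = true) := by
  constructor
  · intro h c hc
    rcases List.mem_append.mp ((List.takeWhile_append_dropWhile (p := p) (l := l)) ▸ hc) with h' | h'
    · exact List.mem_takeWhile_imp h'
    · exact h c h'
  · intro h c hc
    exact h c ((List.dropWhile_sublist (p := p) (l := l)).mem hc)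

lemma rstrip_eq_nil_iff (y : List Char) :
    PySem.Chars.rstrip y = [] ↔ ∀ c ∈ y, PySem.Chars.isspace c = true := by
  simp only [PySem.Chars.rstrip, List.reverse_eq_nil_iff, List.dropWhile_eq_nil_iff]
  constructor
  · intro h c hc; exact h c (List.mem_reverse.mpr hc)
  · intro h c hc; exact h c (List.mem_reverse.mp hc)

lemma strip_eq_nil_iff (y : List Char) :
    PySem.Chars.strip y = [] ↔ ∀ c ∈ y, PySem.Chars.isspace c = true := by
  rw [PySem.Chars.strip, rstrip_eq_nil_iff, PySem.Chars.lstrip, forall_dropWhile_iff]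

-- on an already-rstripped line, "line.strip() == ''" is "line == ''"
lemma strip_rstrip_nil (x : List Char) :
    PySem.Chars.strip (PySem.Chars.rstrip x) = [] ↔ PySem.Chars.rstrip x = [] := by
  rw [strip_eq_nil_iff, rstrip_eq_nil_iff]
  unfold PySem.Chars.rstrip
  constructor
  · intro h c hc
    exact (forall_dropWhile_iff _ _).mp
      (fun d hd => h d (List.mem_reverse.mpr hd)) c (List.mem_reverse.mpr hc)
  · intro h c hc
    exact h _ (List.mem_reverse.mp ((List.dropWhile_sublist _).mem (List.mem_reverse.mp hc)))

lemma head_dropWhile_false {α : Type} (p : α → Bool) (ls : List α) (hd : α)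
    (h : hd ∈ (ls.dropWhile p).head?) : p hd = false := by
  induction ls with
  | nil => simp at h
  | cons a ls ih =>
    by_cases ha : p a
    · rw [List.dropWhile_cons_of_pos ha] at h
      exact ih h
    · rw [List.dropWhile_cons_of_neg ha] at h
      simp at h
      rw [h] at ha
      simp [ha]

lemma aLoop_empty_run (run rest : List (List Char)) (ec : Nat)
    (h : ∀ l ∈ run, l = ([] : List Char)) :
    aLoop (run ++ rest) ec = run.take (2 - ec) ++ aLoop rest (ec + run.length) := by
  induction run generalizing ec with
  | nil => simp
  | cons l run ih =>
    have hl : l = ([] : List Char) := h l (by simp)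
    subst hl
    simp only [List.cons_append, aLoop,
      if_pos (by decide : PySem.Chars.strip ([] : List Char) = [])]
    rw [ih _ (fun x hx => h x (List.mem_cons_of_mem _ hx))]
    by_cases hec : ec + 1 ≤ 2
    · have h2 : 2 - ec = (2 - (ec + 1)) + 1 := by omega
      simp only [if_pos hec, h2, List.take_succ_cons,
        List.cons_append, List.length_cons, List.nil_append]
      have : ec + 1 + run.length = ec + (run.length + 1) := by omega
      rw [this]
    · have h2 : 2 - ec = 0 := by omega
      have h3 : 2 - (ec + 1) = 0 := by omega
      simp only [if_neg hec, h2, h3, List.take_zero, List.nil_append, List.length_cons]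
      have : ec + 1 + run.length = ec + (run.length + 1) := by omega
      rw [this]

lemma aLoop_reset (rest : List (List Char)) (ec : Nat)
    (h : ∀ hd ∈ rest.head?, PySem.Chars.strip hd ≠ []) :
    aLoop rest ec = aLoop rest 0 := by
  cases rest with
  | nil => rfl
  | cons l ls =>
    have hne : PySem.Chars.strip l ≠ [] := h l (by simp)
    simp [aLoop, hne]

lemma aLoop_nonempty_run (run rest : List (List Char))
    (h : ∀ l ∈ run, PySem.Chars.strip l ≠ []) :
    aLoop (run ++ rest) 0 = run ++ aLoop rest 0 := by
  induction run with
  | nil => simp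
  | cons l run ih =>
    have hl := h l (by simp)
    simp only [List.cons_append, aLoop, if_neg hl]
    rw [ih (fun x hx => h x (by simp [hx]))]

lemma runs_eq_aLoop_aux (n : Nat) : ∀ (lines : List (List Char)), lines.length ≤ n →
    (∀ l ∈ lines, (PySem.Chars.strip l = [] ↔ l = [])) →
    (pvRuns lines).flatMap (fun r => if r.1 then r.2.take 2 else r.2) = aLoop lines 0 := by
  induction n with
  | zero =>
    intro lines hlen _
    have hnil : lines = [] := List.eq_nil_of_length_eq_zero (Nat.le_zero.mp hlen)
    subst hnil
    simp [pvRuns, aLoop]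
  | succ n ihn =>
    intro lines hlen h
    match lines with
    | [] => simp [pvRuns, aLoop]
    | l :: ls =>
    rw [pvRuns]
    simp only [List.flatMap_cons]
    have hlenrest : (ls.dropWhile (fun x => x.isEmpty == l.isEmpty)).length ≤ n :=
      le_trans (List.length_dropWhile_le _ _) (Nat.succ_le_succ_iff.mp hlen)
    have hsplit : l :: ls.takeWhile (fun x => x.isEmpty == l.isEmpty)
        ++ ls.dropWhile (fun x => x.isEmpty == l.isEmpty) = l :: ls := by
      rw [List.cons_append, List.takeWhile_append_dropWhile]
    have hrest : ∀ x ∈ ls.dropWhile (fun x => x.isEmpty == l.isEmpty), x ∈ l :: ls :=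
      fun x hx => List.mem_cons_of_mem l ((List.dropWhile_sublist _).mem hx)
    have ihh := ihn _ hlenrest (fun x hx => h x (hrest x hx))
    by_cases hk : l.isEmpty
    · -- blank run: every line in it is []
      have hrun : ∀ x ∈ l :: ls.takeWhile (fun x => x.isEmpty == l.isEmpty),
          x = ([] : List Char) := by
        intro x hx
        rcases List.mem_cons.mp hx with rfl | hx'
        · exact List.isEmpty_iff.mp hk
        · have := List.mem_takeWhile_imp hx'
          simp only [hk, beq_iff_eq] at this
          exact List.isEmpty_iff.mp this
      have hhd : ∀ hd ∈ (ls.dropWhile (fun x => x.isEmpty == l.isEmpty)).head?,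
          PySem.Chars.strip hd ≠ [] := by
        intro hd hhd
        have hfalse := head_dropWhile_false _ _ _ hhd
        simp only [hk] at hfalse
        have hdmem : hd ∈ l :: ls := hrest hd (by
          cases hdr : (ls.dropWhile (fun x => x.isEmpty == l.isEmpty)) with
          | nil => rw [hdr] at hhd; simp at hhd
          | cons a t =>
            rw [hdr] at hhd; simp at hhd; simp [hhd])
        intro hstrip
        have := (h hd hdmem).mp hstrip
        rw [this] at hfalse
        simp at hfalse
      conv_rhs => rw [← hsplit]
      rw [aLoop_empty_run _ _ 0 hrun, aLoop_reset _ _ hhd, ihh]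
      simp [hk]
    · -- non-blank run: every line in it has nonempty strip
      have hrun : ∀ x ∈ l :: ls.takeWhile (fun x => x.isEmpty == l.isEmpty),
          PySem.Chars.strip x ≠ [] := by
        intro x hx hstrip
        have hxnil : x = ([] : List Char) := by
          rcases List.mem_cons.mp hx with rfl | hx'
          · exact (h x (by simp)).mp hstrip
          · exact (h x (List.mem_cons_of_mem l ((List.takeWhile_sublist _).mem hx'))).mp hstrip
        rcases List.mem_cons.mp hx with rfl | hx'
        · rw [hxnil] at hk; simp at hk
        · have := List.mem_takeWhile_imp hx'
          rw [hxnil] at this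
          simp only [List.isEmpty_nil, Bool.true_beq] at this
          rw [this] at hk
          exact hk rfl
      conv_rhs => rw [← hsplit]
      rw [aLoop_nonempty_run _ _ hrun, ihh]
      simp [hk]

lemma runs_eq_aLoop (lines : List (List Char))
    (h : ∀ l ∈ lines, (PySem.Chars.strip l = [] ↔ l = [])) :
    (pvRuns lines).flatMap (fun r => if r.1 then r.2.take 2 else r.2) = aLoop lines 0 :=
  runs_eq_aLoop_aux lines.length lines (le_refl _) h

-- ===== VERDICT (by name: the statement is the Claim_ definition above) =====
theorem compress_whitespace_py_spec : Claim_equal_compress_whitespace_py := by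
  intro content _
  unfold Spec_compress_whitespace_py compress_whitespace_py compress_whitespace_py_alt
  simp only
  rw [foldl_eq_aLoop, List.nil_append,
    runs_eq_aLoop _ (by
      intro l hl
      rcases List.mem_map.mp hl with ⟨x, _, rfl⟩
      constructor
      · exact (strip_rstrip_nil x).mp
      · intro hnil
        rw [hnil]
        decide)]
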